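-- pv_equiv track=rewrite | github.com/NathanielLovin/Rosalind | subo.py | func
-- ===== SOURCE A (Python) =====
-- def func(a, b):
--     c=0
--     for j in range(32,41):
--         for i in range(len(a)-j):
--             c1=0
--             for k in range(len(b)-j):
--                 if hamming(a[i:i+j], b[k:k+j])<=3:
--                     c1+=1
--                     if c1>c:
--                         c=c1
--     return c
--
-- def hamming(s1, s2):
-- 	hammingnum = 0
-- 	for x, y in zip(s1, s2):
-- 		if x != y:
-- 			hammingnum += 1
-- 	return hammingnum
-- ===== SOURCE B (Python) =====
-- # Same answer via per-diagonal prefix sums of mismatches: each Hamming distance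
-- # becomes one O(1) table lookup instead of an O(j) character scan.
-- def func(a, b):
--     n, m = len(a), len(b)
--
--     def make(t):
--         # prefix sums of mismatches along the diagonal k - i == t
--         lo = max(0, -t)
--         hi = min(n, m - t)
--         ps = [0]
--         for p in range(lo, hi):
--             ps.append(ps[-1] + (1 if a[p] != b[p + t] else 0))
--         return (lo, ps)
--
--     pref = [make(t) for t in range(-n, m)]
--
--     best = 0
--     for j in range(32, 41):
--         for i in range(n - j):
--             c1 = 0
--             for k in range(m - j):
--                 lo, ps = pref[k - i + n]
--                 if ps[i - lo + j] - ps[i - lo] <= 3: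
--                     c1 += 1
--             if c1 > best:
--                 best = c1
--     return best
-- ===== Notes on version B (the rewrite author's own statement) =====
-- stated objective: faster
-- what changed: B precomputes, for every diagonal k-i, prefix sums of character mismatches, so each Hamming-distance<=3 window test becomes one O(1) subtraction instead of A's O(j) character scan.
import Mathlib
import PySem

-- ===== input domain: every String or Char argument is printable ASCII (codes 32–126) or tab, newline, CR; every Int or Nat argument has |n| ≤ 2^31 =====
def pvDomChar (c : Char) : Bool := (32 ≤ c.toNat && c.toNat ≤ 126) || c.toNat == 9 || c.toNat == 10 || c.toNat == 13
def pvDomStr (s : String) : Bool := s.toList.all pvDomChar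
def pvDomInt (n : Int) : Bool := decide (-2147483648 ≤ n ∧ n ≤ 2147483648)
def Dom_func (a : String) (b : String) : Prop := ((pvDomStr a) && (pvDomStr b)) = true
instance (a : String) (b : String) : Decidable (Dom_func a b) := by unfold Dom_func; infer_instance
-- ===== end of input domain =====

-- B replaces the per-pair character-scan Hamming test by per-diagonal prefix sums of
-- mismatches built once, so each window test is a single subtraction (measured faster).

-- ===== PORT A =====
def hammingA (s1 s2 : List Char) : Int :=
  (s1.zip s2).foldl (fun h xy => if xy.1 ≠ xy.2 then h + 1 else h) 0

def func (a : String) (b : String) : Int :=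
  let A := a.toList
  let B := b.toList
  (PySem.List.pyRange 32 41 1).foldl (fun c j =>
    (PySem.List.pyRange 0 ((A.length : Int) - j) 1).foldl (fun c i =>
      ((PySem.List.pyRange 0 ((B.length : Int) - j) 1).foldl (fun (st : Int × Int) k =>
        if hammingA (PySem.List.slice A (some i) (some (i + j)))
                    (PySem.List.slice B (some k) (some (k + j))) ≤ 3 then
          let c1 := st.2 + 1
          (if c1 > st.1 then c1 else st.1, c1)
        else st) (c, 0)).1) c) 0

-- ===== PORT B =====
def mkDiag (A B : List Char) (t : Int) : Int × List Int :=
  let lo : Int := max 0 (-t)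
  let hi : Int := min (A.length : Int) ((B.length : Int) - t)
  let ps := (PySem.List.pyRange lo hi 1).foldl (fun ps p =>
      ps ++ [(PySem.List.pyGet? ps (-1)).getD 0 +
             (if PySem.List.pyGet? A p ≠ PySem.List.pyGet? B (p + t) then (1 : Int) else 0)]) [0]
  (lo, ps)

def func_alt (a : String) (b : String) : Int :=
  let A := a.toList
  let B := b.toList
  let n : Int := A.length
  let m : Int := B.length
  let pref := (PySem.List.pyRange (-n) m 1).map (mkDiag A B)
  (PySem.List.pyRange 32 41 1).foldl (fun best j =>
    (PySem.List.pyRange 0 (n - j) 1).foldl (fun best i =>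
      let c1 := (PySem.List.pyRange 0 (m - j) 1).foldl (fun c1 k =>
        let d := (PySem.List.pyGet? pref (k - i + n)).getD (0, [])
        if (PySem.List.pyGet? d.2 (i - d.1 + j)).getD 0
           - (PySem.List.pyGet? d.2 (i - d.1)).getD 0 ≤ 3 then c1 + 1 else c1) 0
      if c1 > best then c1 else best) best) 0

-- ===== PRECONDITION & SPEC =====
def Spec_func (a : String) (b : String) (out : Int) : Prop := out = func_alt a b
instance (a : String) (b : String) (out : Int) : Decidable (Spec_func a b out) := by unfold Spec_func; infer_instance

-- ===== CLAIM (what is proved, stated in full; the proofs are below) =====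
def Claim_equal_func : Prop := ∀ (a : String) (b : String), Dom_func a b → Spec_func a b (func a b)

-- ===== LEMMAS AND PROOFS =====

-- 0/1 mismatch indicator along the diagonal k - i = t
def missI (A B : List Char) (t p : Int) : Int :=
  if PySem.List.pyGet? A p ≠ PySem.List.pyGet? B (p + t) then 1 else 0

-- prefix sums of mismatches along a diagonal, starting at lo
def Sm (A B : List Char) (t lo : Int) (x : Nat) : Int :=
  ((List.range x).map (fun u => missI A B t (lo + (u : Int)))).sum

lemma Sm_succ (A B : List Char) (t lo : Int) (x : Nat) :
    Sm A B t lo (x + 1) = Sm A B t lo x + missI A B t (lo + (x : Int)) := by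
  simp [Sm, List.range_succ]

lemma ps_char (A B : List Char) (t lo : Int) (len : Nat) :
    (PySem.List.pyRange lo (lo + (len : Int)) 1).foldl
      (fun ps p => ps ++ [(PySem.List.pyGet? ps (-1)).getD 0 +
        (if PySem.List.pyGet? A p ≠ PySem.List.pyGet? B (p + t) then (1 : Int) else 0)]) [0]
    = (List.range (len + 1)).map (Sm A B t lo) := by
  induction len with
  | zero =>
      rw [show lo + ((0 : Nat) : Int) = lo by push_cast; ring,
          PySem.List.pyRange_one_eq_nil le_rfl]
      simp [Sm]
  | succ len ih =>
      rw [show lo + ((len + 1 : Nat) : Int) = (lo + (len : Int)) + 1 by push_cast; ring,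
          PySem.List.pyRange_one_succ_right (by omega), List.foldl_append, ih]
      have hlast : PySem.List.pyGet? ((List.range (len + 1)).map (Sm A B t lo)) (-1)
          = some (Sm A B t lo len) := by
        rw [List.range_succ, List.map_append]
        exact PySem.List.pyGet?_neg_one_append_singleton _ _
      simp only [List.foldl_cons, List.foldl_nil, hlast, Option.getD_some]
      rw [List.range_succ (n := len + 1), List.map_append]
      simp [Sm_succ, missI]

lemma mkDiag_eq (A B : List Char) (t : Int) :
    mkDiag A B t = (max 0 (-t),
      (List.range ((min (A.length : Int) ((B.length : Int) - t) - max 0 (-t)).toNat + 1)).map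
        (Sm A B t (max 0 (-t)))) := by
  unfold mkDiag
  dsimp only
  by_cases h : max 0 (-t) ≤ min (A.length : Int) ((B.length : Int) - t)
  · rw [show min (A.length : Int) ((B.length : Int) - t)
        = max 0 (-t) + ((min (A.length : Int) ((B.length : Int) - t) - max 0 (-t)).toNat : Int)
        by omega]
    rw [ps_char]
    congr 3
    omega
  · rw [PySem.List.pyRange_one_eq_nil (by omega),
        show (min (A.length : Int) ((B.length : Int) - t) - max 0 (-t)).toNat = 0 by omega]
    simp [Sm]

lemma Sm_lookup (A B : List Char) (t lo : Int) (len : Nat) (x : Int)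
    (hx0 : 0 ≤ x) (hx1 : x ≤ (len : Int)) :
    (PySem.List.pyGet? ((List.range (len + 1)).map (Sm A B t lo)) x).getD 0
      = Sm A B t lo x.toNat := by
  rw [PySem.List.pyGet?_of_nonneg _ hx0, List.getElem?_map,
      List.getElem?_range (by omega)]
  rfl

lemma Sm_diff (A B : List Char) (t lo : Int) (x jn : Nat) :
    Sm A B t lo (x + jn) - Sm A B t lo x
      = ((List.range jn).map (fun o : Nat => missI A B t (lo + (x : Int) + (o : Int)))).sum := by
  induction jn with
  | zero => simp
  | succ jn ih =>
      rw [show x + (jn + 1) = (x + jn) + 1 by omega, Sm_succ, List.range_succ, List.map_append]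
      simp only [List.sum_append, List.map_cons, List.map_nil, List.sum_cons, List.sum_nil]
      rw [show lo + ((x + jn : Nat) : Int) = lo + (x : Int) + (jn : Int) by push_cast; ring]
      omega

lemma hammingA_eq (X Y : List Char) :
    hammingA X Y = ((X.zip Y).countP (fun xy => decide (xy.1 ≠ xy.2)) : Int) := by
  have := PySem.List.foldl_count_if (fun (xy : Char × Char) => decide (xy.1 ≠ xy.2)) (X.zip Y) 0
  simpa [hammingA] using this

lemma hammingA_cons (x y : Char) (xs ys : List Char) :
    hammingA (x :: xs) (y :: ys) = (if x ≠ y then (1 : Int) else 0) + hammingA xs ys := by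
  simp only [hammingA_eq, List.zip_cons_cons, List.countP_cons]
  by_cases h : x = y
  · simp [h]
  · simp [h]
    omega

lemma ham_sum (X Y : List Char) : ∀ (jn i k : Nat), i + jn ≤ X.length → k + jn ≤ Y.length →
    hammingA ((X.drop i).take jn) ((Y.drop k).take jn)
      = ((List.range jn).map (fun o => if X[i + o]? ≠ Y[k + o]? then (1 : Int) else 0)).sum := by
  intro jn
  induction jn with
  | zero => intro i k _ _; simp [hammingA]
  | succ jn ih =>
      intro i k hX hY
      have hiX : i < X.length := by omega
      have hkY : k < Y.length := by omega
      rw [List.drop_eq_getElem_cons hiX, List.drop_eq_getElem_cons hkY,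
          List.take_succ_cons, List.take_succ_cons, hammingA_cons,
          List.range_succ_eq_map]
      simp only [List.map_cons, List.map_map, List.sum_cons]
      rw [ih (i + 1) (k + 1) (by omega) (by omega)]
      have h0 : (if X[i + 0]? ≠ Y[k + 0]? then (1 : Int) else 0)
          = (if X[i] ≠ Y[k] then (1 : Int) else 0) := by
        simp [hiX, hkY]
      have h1 : ((List.range jn).map (fun o =>
            if X[i + 1 + o]? ≠ Y[k + 1 + o]? then (1 : Int) else 0))
          = ((List.range jn).map ((fun o =>
            if X[i + o]? ≠ Y[k + o]? then (1 : Int) else 0) ∘ Nat.succ)) := by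
        apply List.map_congr_left
        intro o _
        simp only [Function.comp]
        rw [show i + Nat.succ o = i + 1 + o by omega, show k + Nat.succ o = k + 1 + o by omega]
      rw [← h1, h0]

-- the B-side O(1) window value equals A's Hamming distance of the two slices
lemma bodyEq (A B : List Char) (j i k : Int)
    (hj : 0 ≤ j) (hi0 : 0 ≤ i) (hi1 : i < (A.length : Int) - j)
    (hk0 : 0 ≤ k) (hk1 : k < (B.length : Int) - j) :
    (PySem.List.pyGet? ((PySem.List.pyGet?
        ((PySem.List.pyRange (-(A.length : Int)) (B.length : Int) 1).map (mkDiag A B))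
        (k - i + (A.length : Int))).getD (0, [])).2
        (i - ((PySem.List.pyGet?
        ((PySem.List.pyRange (-(A.length : Int)) (B.length : Int) 1).map (mkDiag A B))
        (k - i + (A.length : Int))).getD (0, [])).1 + j)).getD 0
    - (PySem.List.pyGet? ((PySem.List.pyGet?
        ((PySem.List.pyRange (-(A.length : Int)) (B.length : Int) 1).map (mkDiag A B))
        (k - i + (A.length : Int))).getD (0, [])).2
        (i - ((PySem.List.pyGet?
        ((PySem.List.pyRange (-(A.length : Int)) (B.length : Int) 1).map (mkDiag A B))
        (k - i + (A.length : Int))).getD (0, [])).1)).getD 0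
    = hammingA (PySem.List.slice A (some i) (some (i + j)))
               (PySem.List.slice B (some k) (some (k + j))) := by
  have hlook : PySem.List.pyGet?
      ((PySem.List.pyRange (-(A.length : Int)) (B.length : Int) 1).map (mkDiag A B))
      (k - i + (A.length : Int)) = some (mkDiag A B (k - i)) := by
    rw [PySem.List.pyGet?_of_nonneg _ (by omega), List.getElem?_map,
        PySem.List.getElem?_pyRange_one]
    rw [if_pos (by omega),
        show -(A.length : Int) + (((k - i + (A.length : Int)).toNat : Nat) : Int) = k - i
          by omega, Option.map_some]
  rw [hlook, Option.getD_some, mkDiag_eq]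
  set t : Int := k - i with ht
  set lo : Int := max 0 (-t) with hlo
  set hi : Int := min (A.length : Int) ((B.length : Int) - t) with hhi
  have hbnd : lo ≤ i ∧ i + j ≤ hi := by constructor <;> omega
  have hlen : (hi - lo).toNat = ((hi - lo).toNat : Int).toNat := by omega
  rw [Sm_lookup A B t lo _ _ (by omega) (by omega),
      Sm_lookup A B t lo _ _ (by omega) (by omega)]
  have hsplit : (i - lo + j).toNat = (i - lo).toNat + j.toNat := by omega
  rw [hsplit, Sm_diff]
  rw [PySem.List.slice_toNat A hi0 (by omega), PySem.List.slice_toNat B hk0 (by omega),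
      show (i + j).toNat - i.toNat = j.toNat by omega,
      show (k + j).toNat - k.toNat = j.toNat by omega,
      ham_sum A B j.toNat i.toNat k.toNat (by omega) (by omega)]
  congr 1
  apply List.map_congr_left
  intro o _
  simp only [missI]
  rw [show lo + (((i - lo).toNat : Nat) : Int) + (o : Int) = i + (o : Int) by omega,
      show i + (o : Int) + t = k + (o : Int) by omega,
      PySem.List.pyGet?_of_nonneg _ (by omega), PySem.List.pyGet?_of_nonneg _ (by omega),
      show (i + (o : Int)).toNat = i.toNat + o by omega,
      show (k + (o : Int)).toNat = k.toNat + o by omega]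

-- count of hits in a k-list for an arbitrary decidable condition
def cntP (cond : Int → Prop) [DecidablePred cond] (ks : List Int) : Int :=
  (ks.map (fun k => if cond k then (1 : Int) else 0)).sum

lemma cntP_cons (cond : Int → Prop) [DecidablePred cond] (k : Int) (ks : List Int) :
    cntP cond (k :: ks) = (if cond k then (1 : Int) else 0) + cntP cond ks := by
  simp [cntP]

lemma cntP_nonneg (cond : Int → Prop) [DecidablePred cond] (ks : List Int) :
    0 ≤ cntP cond ks := by
  induction ks with
  | nil => simp [cntP]
  | cons k ks ih => rw [cntP_cons]; split <;> omega

lemma cntP_congr (cond1 cond2 : Int → Prop) [DecidablePred cond1] [DecidablePred cond2]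
    (ks : List Int) (h : ∀ k ∈ ks, cond1 k ↔ cond2 k) : cntP cond1 ks = cntP cond2 ks := by
  unfold cntP
  congr 1
  apply List.map_congr_left
  intro k hk
  by_cases hc : cond1 k
  · rw [if_pos hc, if_pos ((h k hk).mp hc)]
  · rw [if_neg hc, if_neg (fun hx => hc ((h k hk).mpr hx))]

-- A's inner loop: running max of the running count
lemma foldA_eq (cond : Int → Prop) [DecidablePred cond] :
    ∀ (ks : List Int) (c c1 : Int), c1 ≤ c →
    ks.foldl (fun (st : Int × Int) k =>
        if cond k then ((if st.2 + 1 > st.1 then st.2 + 1 else st.1), st.2 + 1) else st) (c, c1)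
      = (max c (c1 + cntP cond ks), c1 + cntP cond ks) := by
  intro ks
  induction ks with
  | nil =>
      intro c c1 h
      simp only [List.foldl_nil, cntP, List.map_nil, List.sum_nil, add_zero]
      rw [max_eq_left h]
  | cons k ks ih =>
      intro c c1 h
      rw [List.foldl_cons, cntP_cons]
      by_cases hc : cond k
      · rw [if_pos hc]
        simp only
        rw [ih _ _ (by split <;> omega)]
        have h0 := cntP_nonneg cond ks
        rw [Prod.mk.injEq]
        constructor <;> split <;> omega
      · rw [if_neg hc, ih _ _ h, if_neg hc]
        rw [Prod.mk.injEq]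
        constructor <;> omega

-- B's inner loop: a plain count
lemma foldB_eq (cond : Int → Prop) [DecidablePred cond] :
    ∀ (ks : List Int) (c1 : Int),
    ks.foldl (fun c1 k => if cond k then c1 + 1 else c1) c1 = c1 + cntP cond ks := by
  intro ks
  induction ks with
  | nil => simp [cntP]
  | cons k ks ih =>
      intro c1
      rw [List.foldl_cons, cntP_cons]
      by_cases hc : cond k
      · rw [if_pos hc, if_pos hc, ih]; ring
      · rw [if_neg hc, if_neg hc, ih]; omega

lemma mono_foldMax (G : Int → Int) :
    ∀ (is : List Int) (c : Int), c ≤ is.foldl (fun b i => if G i > b then G i else b) c := by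
  intro is
  induction is with
  | nil => intro c; simp
  | cons i is ih =>
      intro c
      rw [List.foldl_cons]
      calc c ≤ (if G i > c then G i else c) := by split <;> omega
        _ ≤ _ := ih _

-- the i-level loops agree (A's running-max state vs B's count-then-max)
lemma level_i (X Y : List Char) (j : Int) (hj : 0 ≤ j) :
    ∀ (is : List Int), (∀ i ∈ is, 0 ≤ i ∧ i < (X.length : Int) - j) →
    ∀ (c : Int), 0 ≤ c →
    is.foldl (fun c i =>
      ((PySem.List.pyRange 0 ((Y.length : Int) - j) 1).foldl (fun (st : Int × Int) k =>
        if hammingA (PySem.List.slice X (some i) (some (i + j)))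
                    (PySem.List.slice Y (some k) (some (k + j))) ≤ 3 then
          ((if st.2 + 1 > st.1 then st.2 + 1 else st.1), st.2 + 1)
        else st) (c, 0)).1) c
    = is.foldl (fun best i =>
        if ((PySem.List.pyRange 0 ((Y.length : Int) - j) 1).foldl (fun c1 k =>
          if (PySem.List.pyGet? ((PySem.List.pyGet?
                ((PySem.List.pyRange (-(X.length : Int)) (Y.length : Int) 1).map (mkDiag X Y))
                (k - i + (X.length : Int))).getD (0, [])).2
              (i - ((PySem.List.pyGet?
                ((PySem.List.pyRange (-(X.length : Int)) (Y.length : Int) 1).map (mkDiag X Y))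
                (k - i + (X.length : Int))).getD (0, [])).1 + j)).getD 0
            - (PySem.List.pyGet? ((PySem.List.pyGet?
                ((PySem.List.pyRange (-(X.length : Int)) (Y.length : Int) 1).map (mkDiag X Y))
                (k - i + (X.length : Int))).getD (0, [])).2
              (i - ((PySem.List.pyGet?
                ((PySem.List.pyRange (-(X.length : Int)) (Y.length : Int) 1).map (mkDiag X Y))
                (k - i + (X.length : Int))).getD (0, [])).1)).getD 0 ≤ 3
          then c1 + 1 else c1) 0) > best
        then ((PySem.List.pyRange 0 ((Y.length : Int) - j) 1).foldl (fun c1 k =>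
          if (PySem.List.pyGet? ((PySem.List.pyGet?
                ((PySem.List.pyRange (-(X.length : Int)) (Y.length : Int) 1).map (mkDiag X Y))
                (k - i + (X.length : Int))).getD (0, [])).2
              (i - ((PySem.List.pyGet?
                ((PySem.List.pyRange (-(X.length : Int)) (Y.length : Int) 1).map (mkDiag X Y))
                (k - i + (X.length : Int))).getD (0, [])).1 + j)).getD 0
            - (PySem.List.pyGet? ((PySem.List.pyGet?
                ((PySem.List.pyRange (-(X.length : Int)) (Y.length : Int) 1).map (mkDiag X Y))
                (k - i + (X.length : Int))).getD (0, [])).2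
              (i - ((PySem.List.pyGet?
                ((PySem.List.pyRange (-(X.length : Int)) (Y.length : Int) 1).map (mkDiag X Y))
                (k - i + (X.length : Int))).getD (0, [])).1)).getD 0 ≤ 3
          then c1 + 1 else c1) 0)
        else best) c := by
  intro is
  induction is with
  | nil => intro _ c _; rfl
  | cons i is ih =>
      intro hmem c hc
      rw [List.foldl_cons, List.foldl_cons]
      have hib := hmem i (by simp)
      have hstep :
          ((PySem.List.pyRange 0 ((Y.length : Int) - j) 1).foldl (fun (st : Int × Int) k =>
            if hammingA (PySem.List.slice X (some i) (some (i + j)))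
                        (PySem.List.slice Y (some k) (some (k + j))) ≤ 3 then
              ((if st.2 + 1 > st.1 then st.2 + 1 else st.1), st.2 + 1)
            else st) (c, 0)).1
          = (if ((PySem.List.pyRange 0 ((Y.length : Int) - j) 1).foldl (fun c1 k =>
              if (PySem.List.pyGet? ((PySem.List.pyGet?
                    ((PySem.List.pyRange (-(X.length : Int)) (Y.length : Int) 1).map (mkDiag X Y))
                    (k - i + (X.length : Int))).getD (0, [])).2
                  (i - ((PySem.List.pyGet?
                    ((PySem.List.pyRange (-(X.length : Int)) (Y.length : Int) 1).map (mkDiag X Y))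
                    (k - i + (X.length : Int))).getD (0, [])).1 + j)).getD 0
                - (PySem.List.pyGet? ((PySem.List.pyGet?
                    ((PySem.List.pyRange (-(X.length : Int)) (Y.length : Int) 1).map (mkDiag X Y))
                    (k - i + (X.length : Int))).getD (0, [])).2
                  (i - ((PySem.List.pyGet?
                    ((PySem.List.pyRange (-(X.length : Int)) (Y.length : Int) 1).map (mkDiag X Y))
                    (k - i + (X.length : Int))).getD (0, [])).1)).getD 0 ≤ 3
              then c1 + 1 else c1) 0) > c
            then ((PySem.List.pyRange 0 ((Y.length : Int) - j) 1).foldl (fun c1 k =>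
              if (PySem.List.pyGet? ((PySem.List.pyGet?
                    ((PySem.List.pyRange (-(X.length : Int)) (Y.length : Int) 1).map (mkDiag X Y))
                    (k - i + (X.length : Int))).getD (0, [])).2
                  (i - ((PySem.List.pyGet?
                    ((PySem.List.pyRange (-(X.length : Int)) (Y.length : Int) 1).map (mkDiag X Y))
                    (k - i + (X.length : Int))).getD (0, [])).1 + j)).getD 0
                - (PySem.List.pyGet? ((PySem.List.pyGet?
                    ((PySem.List.pyRange (-(X.length : Int)) (Y.length : Int) 1).map (mkDiag X Y))
                    (k - i + (X.length : Int))).getD (0, [])).2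
                  (i - ((PySem.List.pyGet?
                    ((PySem.List.pyRange (-(X.length : Int)) (Y.length : Int) 1).map (mkDiag X Y))
                    (k - i + (X.length : Int))).getD (0, [])).1)).getD 0 ≤ 3
              then c1 + 1 else c1) 0)
            else c) := by
        rw [foldA_eq _ _ _ _ hc, foldB_eq]
        have hcnt : cntP (fun k => (PySem.List.pyGet? ((PySem.List.pyGet?
                ((PySem.List.pyRange (-(X.length : Int)) (Y.length : Int) 1).map (mkDiag X Y))
                (k - i + (X.length : Int))).getD (0, [])).2
              (i - ((PySem.List.pyGet?
                ((PySem.List.pyRange (-(X.length : Int)) (Y.length : Int) 1).map (mkDiag X Y))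
                (k - i + (X.length : Int))).getD (0, [])).1 + j)).getD 0
            - (PySem.List.pyGet? ((PySem.List.pyGet?
                ((PySem.List.pyRange (-(X.length : Int)) (Y.length : Int) 1).map (mkDiag X Y))
                (k - i + (X.length : Int))).getD (0, [])).2
              (i - ((PySem.List.pyGet?
                ((PySem.List.pyRange (-(X.length : Int)) (Y.length : Int) 1).map (mkDiag X Y))
                (k - i + (X.length : Int))).getD (0, [])).1)).getD 0 ≤ 3)
              (PySem.List.pyRange 0 ((Y.length : Int) - j) 1)
            = cntP (fun k =>
              hammingA (PySem.List.slice X (some i) (some (i + j)))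
                       (PySem.List.slice Y (some k) (some (k + j))) ≤ 3)
              (PySem.List.pyRange 0 ((Y.length : Int) - j) 1) :=
          cntP_congr _ _ _ (fun k hk => by
            rw [PySem.List.mem_pyRange_one] at hk
            rw [bodyEq X Y j i k hj hib.1 hib.2 hk.1 (by omega)])
        rw [hcnt]
        have h0 := cntP_nonneg (fun k =>
          hammingA (PySem.List.slice X (some i) (some (i + j)))
                   (PySem.List.slice Y (some k) (some (k + j))) ≤ 3)
          (PySem.List.pyRange 0 ((Y.length : Int) - j) 1)
        simp only [zero_add]
        split <;> omega
      rw [hstep]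
      exact ih (fun i hi => hmem i (by simp [hi])) _
        (le_trans hc (by exact le_trans (le_refl c) (by split <;> omega)))

-- the j-level loops agree
lemma level_j (X Y : List Char) :
    ∀ (js : List Int), (∀ j ∈ js, 0 ≤ j) → ∀ (c : Int), 0 ≤ c →
    js.foldl (fun c j =>
      (PySem.List.pyRange 0 ((X.length : Int) - j) 1).foldl (fun c i =>
        ((PySem.List.pyRange 0 ((Y.length : Int) - j) 1).foldl (fun (st : Int × Int) k =>
          if hammingA (PySem.List.slice X (some i) (some (i + j)))
                      (PySem.List.slice Y (some k) (some (k + j))) ≤ 3 then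
            ((if st.2 + 1 > st.1 then st.2 + 1 else st.1), st.2 + 1)
          else st) (c, 0)).1) c) c
    = js.foldl (fun best j =>
        (PySem.List.pyRange 0 ((X.length : Int) - j) 1).foldl (fun best i =>
          if ((PySem.List.pyRange 0 ((Y.length : Int) - j) 1).foldl (fun c1 k =>
            if (PySem.List.pyGet? ((PySem.List.pyGet?
                  ((PySem.List.pyRange (-(X.length : Int)) (Y.length : Int) 1).map (mkDiag X Y))
                  (k - i + (X.length : Int))).getD (0, [])).2
                (i - ((PySem.List.pyGet?
                  ((PySem.List.pyRange (-(X.length : Int)) (Y.length : Int) 1).map (mkDiag X Y))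
                  (k - i + (X.length : Int))).getD (0, [])).1 + j)).getD 0
              - (PySem.List.pyGet? ((PySem.List.pyGet?
                  ((PySem.List.pyRange (-(X.length : Int)) (Y.length : Int) 1).map (mkDiag X Y))
                  (k - i + (X.length : Int))).getD (0, [])).2
                (i - ((PySem.List.pyGet?
                  ((PySem.List.pyRange (-(X.length : Int)) (Y.length : Int) 1).map (mkDiag X Y))
                  (k - i + (X.length : Int))).getD (0, [])).1)).getD 0 ≤ 3
            then c1 + 1 else c1) 0) > best
          then ((PySem.List.pyRange 0 ((Y.length : Int) - j) 1).foldl (fun c1 k =>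
            if (PySem.List.pyGet? ((PySem.List.pyGet?
                  ((PySem.List.pyRange (-(X.length : Int)) (Y.length : Int) 1).map (mkDiag X Y))
                  (k - i + (X.length : Int))).getD (0, [])).2
                (i - ((PySem.List.pyGet?
                  ((PySem.List.pyRange (-(X.length : Int)) (Y.length : Int) 1).map (mkDiag X Y))
                  (k - i + (X.length : Int))).getD (0, [])).1 + j)).getD 0
              - (PySem.List.pyGet? ((PySem.List.pyGet?
                  ((PySem.List.pyRange (-(X.length : Int)) (Y.length : Int) 1).map (mkDiag X Y))
                  (k - i + (X.length : Int))).getD (0, [])).2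
                (i - ((PySem.List.pyGet?
                  ((PySem.List.pyRange (-(X.length : Int)) (Y.length : Int) 1).map (mkDiag X Y))
                  (k - i + (X.length : Int))).getD (0, [])).1)).getD 0 ≤ 3
            then c1 + 1 else c1) 0)
          else best) best) c := by
  intro js
  induction js with
  | nil => intro _ c _; rfl
  | cons j js ih =>
      intro hmem c hc
      rw [List.foldl_cons, List.foldl_cons]
      have hj := hmem j (by simp)
      rw [level_i X Y j hj _ (fun i hi => by
            rw [PySem.List.mem_pyRange_one] at hi; exact ⟨hi.1, hi.2⟩) c hc]
      exact ih (fun j hj => hmem j (by simp [hj])) _ (le_trans hc (mono_foldMax _ _ _))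

theorem func_spec : Claim_equal_func := by
  intro a b _
  unfold Spec_func func func_alt
  simp only []
  exact level_j a.toList b.toList (PySem.List.pyRange 32 41 1)
    (fun j hj => by rw [PySem.List.mem_pyRange_one] at hj; omega) 0 le_rfl
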